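-- pv_equiv track=rewrite | github.com/yullidias/AnaliseDeSentimentosNoTwitter | preprocess.py | removeRepeatChar
-- ===== SOURCE A (Python) =====
-- def removeRepeatChar(words):
--     new_words = []
--     for word in words:
--         new_word = ""
--         for c in word:
--             if(len(new_word)>1):
--                 if(new_word[-1]!=c or new_word[-2]!=c):
--                     new_word+=c
--             else:
--                 new_word+=c
--         new_words.append(new_word)
--     return new_words
-- ===== SOURCE B (Python) =====
-- def removeRepeatChar(words):
--     out = []
--     for word in words:
--         pieces = []
--         i = 0
--         n = len(word)
--         while i < n:
--             j = i
--             while j < n and word[j] == word[i]: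
--                 j += 1
--             pieces.append(word[i] * min(2, j - i))
--             i = j
--         out.append(''.join(pieces))
--     return out
-- ===== Notes on version B (the rewrite author's own statement) =====
-- stated objective: alternative
-- what changed: Replaces the last-two-character lookback on a growing accumulator with run-length grouping: each word is split into maximal runs of equal characters and each run is emitted capped at two copies.
import Mathlib
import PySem

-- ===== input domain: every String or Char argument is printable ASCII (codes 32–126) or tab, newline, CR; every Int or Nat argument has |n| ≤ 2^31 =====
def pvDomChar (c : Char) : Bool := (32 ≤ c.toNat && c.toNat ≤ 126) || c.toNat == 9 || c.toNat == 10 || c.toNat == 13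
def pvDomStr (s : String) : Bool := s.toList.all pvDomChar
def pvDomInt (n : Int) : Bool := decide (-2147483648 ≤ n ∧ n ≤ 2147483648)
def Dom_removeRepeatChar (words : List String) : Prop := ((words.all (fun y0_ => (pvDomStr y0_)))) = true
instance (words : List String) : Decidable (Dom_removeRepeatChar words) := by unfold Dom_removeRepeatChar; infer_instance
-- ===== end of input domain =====

-- B replaces A's last-two-character lookback accumulator with run-length grouping
-- (split each word into maximal runs of equal chars, emit each run capped at two copies).


-- ===== PORT A =====
-- the inner loop's step: append c unless the last two chars of new_word both equal c
def pvStepA (nw : List Char) (c : Char) : List Char :=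
  if 1 < nw.length then
    if PySem.List.pyGet? nw (-1) ≠ some c ∨ PySem.List.pyGet? nw (-2) ≠ some c then nw ++ [c]
    else nw
  else nw ++ [c]

def removeRepeatChar (words : List String) : List String :=
  words.foldl (fun new_words word =>
    new_words ++ [String.mk (word.toList.foldl pvStepA [])]) []

-- ===== PORT B =====
-- run-length grouping: take the maximal run of the head char, emit min 2 (run length) copies
def pvCollapseRuns : List Char → List Char
  | [] => []
  | c :: cs =>
    let k := (cs.takeWhile (· == c)).length
    List.replicate (min 2 (k + 1)) c ++ pvCollapseRuns (cs.dropWhile (· == c))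
termination_by w => w.length
decreasing_by
  simpa using Nat.lt_succ_of_le (List.length_dropWhile_le _ _)

def removeRepeatChar_alt (words : List String) : List String :=
  words.map (fun word => String.mk (pvCollapseRuns word.toList))

-- ===== PRECONDITION & SPEC =====
def Spec_removeRepeatChar (words : List String) (out : List String) : Prop := out = removeRepeatChar_alt words
instance (words : List String) (out : List String) : Decidable (Spec_removeRepeatChar words out) := by unfold Spec_removeRepeatChar; infer_instance

-- ===== CLAIM (what is proved, stated in full; the proofs are below) =====
def Claim_equal_removeRepeatChar : Prop := ∀ (words : List String), Dom_removeRepeatChar words → Spec_removeRepeatChar words (removeRepeatChar words)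

-- ===== LEMMAS AND PROOFS =====

-- abstract state machine for A's inner loop: (last char, do the last TWO chars agree?)
def pvGA : Option Char → Bool → List Char → List Char
  | _, _, [] => []
  | last, two, c :: cs =>
    if last = some c ∧ two = true then pvGA last two cs
    else c :: pvGA (some c) (decide (last = some c)) cs

-- the "two last chars equal" bit of an accumulator
def pvTwo (nw : List Char) : Bool :=
  match nw.reverse with
  | a :: b :: _ => a == b
  | _ => false

theorem pvStepA_eq (nw : List Char) (c : Char) :
    pvStepA nw c =
      if nw.reverse.head? = some c ∧ pvTwo nw = true then nw else nw ++ [c] := by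
  unfold pvStepA pvTwo
  rcases h : nw.reverse with _ | ⟨a, _ | ⟨b, t⟩⟩
  · have hnw : nw = [] := by rw [← List.reverse_reverse nw, h]; rfl
    subst hnw; simp
  · have hnw : nw = [a] := by rw [← List.reverse_reverse nw, h]; rfl
    subst hnw; simp
  · have hnw : nw = (a :: b :: t).reverse := by rw [← List.reverse_reverse nw, h]
    have hlen : 1 < nw.length := by rw [hnw]; simp
    have h1 : PySem.List.pyGet? nw (-1) = some a := by
      simp [PySem.List.pyGet?_neg_one, hnw]
    have hnw2 : nw = t.reverse ++ [b, a] := by rw [hnw]; simp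
    have h2 : PySem.List.pyGet? nw (-2) = some b := by
      rw [PySem.List.pyGet?_neg_ofNat nw 2 (by omega) (by omega), hnw2]
      have hidx : (t.reverse ++ [b, a]).length - 2 = t.reverse.length := by simp
      rw [hidx, List.getElem?_append_right (le_refl _)]
      simp
    rw [if_pos hlen, h1, h2]
    by_cases hac : a = c
    · by_cases hbc : b = c
      · subst hac; subst hbc; simp
      · simp [hac, hbc, Ne.symm hbc]
    · simp [hac]

theorem pvFoldA_eq_gA (w : List Char) : ∀ (nw : List Char),
    w.foldl pvStepA nw = nw ++ pvGA nw.reverse.head? (pvTwo nw) w := by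
  induction w with
  | nil => intro nw; simp [pvGA]
  | cons c w ih =>
    intro nw
    rw [List.foldl_cons, pvStepA_eq, ih]
    by_cases h : nw.reverse.head? = some c ∧ pvTwo nw = true
    · rw [if_pos h]
      conv_rhs => rw [pvGA, if_pos h]
    · rw [if_neg h]
      conv_rhs => rw [pvGA, if_neg h]
      have hhd : (nw ++ [c]).reverse.head? = some c := by simp
      have htwo : pvTwo (nw ++ [c]) = decide (nw.reverse.head? = some c) := by
        unfold pvTwo
        rcases hr : nw.reverse with _ | ⟨a, t⟩
        · simp [List.reverse_append, hr]
        · simp only [List.reverse_append, List.reverse_cons, List.reverse_nil,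
            List.nil_append, List.cons_append, hr, List.head?_cons]
          by_cases hca : c = a
          · subst hca; simp
          · have hac : ¬ a = c := fun hh => hca hh.symm
            simp [hca, hac]
      rw [hhd, htwo]
      simp

-- a run of c's is skipped entirely once the state is (some c, true)
theorem pvGA_skip_run (c : Char) (k : Nat) : ∀ (rest : List Char),
    rest.head? ≠ some c →
    pvGA (some c) true (List.replicate k c ++ rest) = pvGA none false rest := by
  induction k with
  | zero =>
    intro rest hr
    cases rest with
    | nil => simp [pvGA]
    | cons d ds =>
      have hdc : ¬ ((some c : Option Char) = some d) := fun h => hr (by simpa using h.symm)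
      simp only [List.replicate_zero, List.nil_append]
      rw [pvGA, pvGA]
      simp [hdc]
  | succ k ih =>
    intro rest hr
    rw [List.replicate_succ, List.cons_append, pvGA]
    simp only [and_true, reduceIte]
    exact ih rest hr

theorem pvGA_fresh_run (c : Char) (k : Nat) (rest : List Char)
    (hr : rest.head? ≠ some c) :
    pvGA (some c) false (List.replicate k c ++ rest) =
      (if k = 0 then [] else [c]) ++ pvGA none false rest := by
  cases k with
  | zero =>
    cases rest with
    | nil => simp [pvGA]
    | cons d ds =>
      have hdc : ¬ ((some c : Option Char) = some d) := fun h => hr (by simpa using h.symm)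
      simp only [List.replicate_zero, List.nil_append]
      rw [pvGA, pvGA]
      simp [hdc]
  | succ k =>
    rw [List.replicate_succ, List.cons_append, pvGA]
    simp only [Bool.false_eq_true, and_false, if_false]
    simp [pvGA_skip_run c k rest hr]

theorem pvGA_eq_collapse (n : Nat) : ∀ (w : List Char), w.length ≤ n →
    pvGA none false w = pvCollapseRuns w := by
  induction n with
  | zero =>
    intro w hw
    have hnil : w = [] := by cases w <;> simp_all
    subst hnil
    rw [pvCollapseRuns.eq_def]; simp [pvGA]
  | succ n ih =>
    intro w hw
    cases w with
    | nil => rw [pvCollapseRuns.eq_def]; simp [pvGA]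
    | cons c cs =>
      have hsplit : cs = cs.takeWhile (· == c) ++ cs.dropWhile (· == c) :=
        (List.takeWhile_append_dropWhile).symm
      have hrep : cs.takeWhile (· == c) = List.replicate (cs.takeWhile (· == c)).length c := by
        apply List.eq_replicate_of_mem
        intro x hx
        have := List.mem_takeWhile_imp hx
        simpa using this.symm
      have hhd : (cs.dropWhile (· == c)).head? ≠ some c := by
        intro h
        have := List.head?_dropWhile_not (· == c) cs
        rw [h] at this
        simp at this
      have hlen : (cs.dropWhile (· == c)).length ≤ n := by
        have h1 := List.length_dropWhile_le (· == c) cs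
        simp at hw; omega
      rw [pvGA]
      simp only [Bool.false_eq_true, and_false, if_false]
      have hdec : (decide ((none : Option Char) = some c)) = false := by simp
      rw [hdec]
      conv_lhs => rw [hsplit, hrep]
      rw [pvGA_fresh_run c _ _ hhd, ih _ hlen]
      conv_rhs => rw [pvCollapseRuns.eq_def]
      simp only
      rcases hk : (cs.takeWhile (· == c)).length with _ | k
      · simp
      · simp [List.replicate_succ]

theorem pvInner_eq (w : List Char) :
    w.foldl pvStepA [] = pvCollapseRuns w := by
  rw [pvFoldA_eq_gA]
  simp only [List.reverse_nil, List.head?_nil, List.nil_append]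
  have h0 : pvTwo [] = false := by simp [pvTwo]
  rw [h0, pvGA_eq_collapse w.length w (le_refl _)]

theorem pvFold_append_eq_map (g : String → String) : ∀ (ws acc : List String),
    ws.foldl (fun ns w => ns ++ [g w]) acc = acc ++ ws.map g := by
  intro ws
  induction ws with
  | nil => intro acc; simp
  | cons w ws ih => intro acc; simp [ih]

-- ===== VERDICT (by name: the statement is the Claim_ definition above) =====
theorem removeRepeatChar_spec : Claim_equal_removeRepeatChar := by
  intro words _
  unfold Spec_removeRepeatChar removeRepeatChar removeRepeatChar_alt
  rw [pvFold_append_eq_map]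
  simp only [List.nil_append]
  congr 1
  funext w
  rw [pvInner_eq]
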